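-- pv_equiv track=rewrite | github.com/ZckFreedom/Mathworks | db_sqence/easy_db.py | lexicographic_number
-- ===== SOURCE A (Python) =====
-- def lexicographic_number(s_sequence):
-- 	"""
-- 	得到所有移位状态，之后按照字典序排序
-- 	将状态按照字典序排列
-- 	最后得到原序列在状态表中的位置和该循环序列长度
-- 	主要求是否是necklace
-- 	"""
-- 	size = len(s_sequence)
-- 	s_sequence += s_sequence
--
-- 	states = []
-- 	for i in range(size):
-- 		if s_sequence[i:i + size] not in states:
-- 			states.append(s_sequence[i:i + size])
--
-- 	states.sort(reverse=True)
-- 	return states.index(s_sequence[:size]), len(states)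
-- ===== SOURCE B (Python) =====
-- def lexicographic_number(s_sequence):
--     n = len(s_sequence)
--     rotations = {s_sequence[i:] + s_sequence[:i] for i in range(n)}
--     return sum(1 for r in rotations if r > s_sequence), len(rotations)
-- ===== Notes on version B (the rewrite author's own statement) =====
-- stated objective: faster
-- what changed: B builds the distinct rotations as a hash-set comprehension (rotation by concatenation s[i:]+s[:i] instead of slicing a doubled string, dedup by hashing instead of A's linear 'not in list' scan) and replaces A's descending sort plus .index with a direct count of rotations strictly greater than the input; both equal the descending-sort index because the rotations are distinct.
import Mathlib
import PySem

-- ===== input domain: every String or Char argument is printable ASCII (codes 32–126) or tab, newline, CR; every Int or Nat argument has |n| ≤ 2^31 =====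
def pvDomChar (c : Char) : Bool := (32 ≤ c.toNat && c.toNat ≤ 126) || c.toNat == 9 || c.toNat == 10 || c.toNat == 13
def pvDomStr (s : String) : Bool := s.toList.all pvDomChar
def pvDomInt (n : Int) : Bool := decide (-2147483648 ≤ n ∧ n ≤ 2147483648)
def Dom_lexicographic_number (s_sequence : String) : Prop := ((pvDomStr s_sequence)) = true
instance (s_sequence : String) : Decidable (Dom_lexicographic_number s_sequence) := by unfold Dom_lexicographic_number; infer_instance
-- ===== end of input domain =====

-- B replaces A's dedup-list + descending sort + .index by a hash-set of rotations and a count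
-- of rotations strictly greater than the input (measured faster in a timing run).

-- ===== PORT A =====
def lexicographic_number (s_sequence : String) : List Int :=
  let l := s_sequence.toList
  let size : Int := l.length
  let s2 := l ++ l
  let states := (PySem.List.pyRange 0 size 1).foldl
    (fun acc i =>
      if PySem.List.slice s2 (some i) (some (i + size)) ∈ acc then acc
      else acc ++ [PySem.List.slice s2 (some i) (some (i + size))]) []
  let states := PySem.List.sorted states (fun x => x) true
  match PySem.List.index? states (PySem.List.slice s2 none (some size)) with
  | some k => [(k : Int), (states.length : Int)]
  | none => []          -- Python raises ValueError here (empty input); excluded by Pre_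

-- ===== PORT B =====
def lexicographic_number_alt (s_sequence : String) : List Int :=
  let l := s_sequence.toList
  let n : Int := l.length
  let rotations : PySem.Set (List Char) := (PySem.List.pyRange 0 n 1).foldl
    (fun st i => PySem.Set.add st
      (PySem.List.slice l (some i) none ++ PySem.List.slice l none (some i)))
    PySem.Set.empty
  let count := rotations.foldl (fun acc r => if l < r then acc + 1 else acc) (0 : Int)
  [count, (rotations.length : Int)]

-- ===== PRECONDITION & SPEC =====
-- A raises ValueError on the empty string (states is empty, .index fails); excluded.
def Pre_lexicographic_number (s_sequence : String) : Prop := s_sequence ≠ ""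
instance (s_sequence : String) : Decidable (Pre_lexicographic_number s_sequence) := by
  unfold Pre_lexicographic_number; infer_instance
def pvWitness_lexicographic_number : String := "aab"

def Spec_lexicographic_number (s_sequence : String) (out : List Int) : Prop :=
  out = lexicographic_number_alt s_sequence
instance (s_sequence : String) (out : List Int) : Decidable (Spec_lexicographic_number s_sequence out) := by
  unfold Spec_lexicographic_number; infer_instance

-- ===== CLAIM (what is proved, stated in full; the proofs are below) =====
def Claim_equal_lexicographic_number : Prop :=
  ∀ (s_sequence : String), Dom_lexicographic_number s_sequence →
    Pre_lexicographic_number s_sequence →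
    Spec_lexicographic_number s_sequence (lexicographic_number s_sequence)

-- ===== LEMMAS AND PROOFS =====

-- index of v in a strictly decreasing list = number of elements greater than v
theorem index?_strict_desc (ys : List (List Char)) (v : List Char)
    (hp : ys.Pairwise (fun a b => b < a)) (hv : v ∈ ys) :
    PySem.List.index? ys v = some (ys.countP (fun y => decide (v < y))) := by
  induction ys with
  | nil => cases hv
  | cons y t ih =>
    rcases List.pairwise_cons.mp hp with ⟨hy, ht⟩
    by_cases hvy : v = y
    · subst hvy
      rw [PySem.List.index?_cons_self]
      have h0 : t.countP (fun y => decide (v < y)) = 0 := by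
        apply List.countP_eq_zero.mpr
        intro b hb
        simp only [decide_eq_true_eq]
        exact not_lt_of_gt (hy b hb)
      simp [h0]
    · have hvt : v ∈ t := by
        rcases hv with _ | hv
        · exact absurd rfl hvy
        · assumption
      rw [PySem.List.index?_cons_of_ne (h := Ne.symm hvy), ih ht hvt]
      have hlt : v < y := hy v hvt
      simp [hlt]

-- the k-th rotation, 0 ≤ k ≤ n
def pvRot (l : List Char) (k : Nat) : List Char := l.drop k ++ l.take k

theorem slice_double_rot (l : List Char) (k : Nat) (hk : k ≤ l.length) :
    PySem.List.slice (l ++ l) (some (k : Int)) (some ((k : Int) + (l.length : Int))) =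
      pvRot l k := by
  rw [PySem.List.slice_natCast_add]
  rw [List.drop_append_of_le_length hk]
  rw [List.take_append]
  have h1 : (l.drop k).length = l.length - k := List.length_drop ..
  rw [List.take_of_length_le (by omega), h1]
  have h2 : l.length - (l.length - k) = k := by omega
  rw [h2, pvRot]

-- A's dedup loop builds the set of rotations
theorem states_eq (l : List Char) :
    ((PySem.List.pyRange 0 (l.length : Int) 1).foldl
      (fun acc i =>
        if PySem.List.slice (l ++ l) (some i) (some (i + (l.length : Int))) ∈ acc then acc
        else acc ++ [PySem.List.slice (l ++ l) (some i) (some (i + (l.length : Int)))]) []) =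
    PySem.Set.ofList ((List.range l.length).map (pvRot l)) := by
  rw [PySem.List.pyRange_one]
  simp only [sub_zero, Int.toNat_natCast, List.foldl_map, zero_add]
  have hcongr : ∀ (acc : List (List Char)) (k : Nat), k ∈ List.range l.length →
      (if PySem.List.slice (l ++ l) (some (k : Int)) (some ((k : Int) + (l.length : Int))) ∈ acc then acc
       else acc ++ [PySem.List.slice (l ++ l) (some (k : Int)) (some ((k : Int) + (l.length : Int)))]) =
      PySem.Set.add acc (pvRot l k) := by
    intro acc k hk
    rw [slice_double_rot l k (le_of_lt (List.mem_range.mp hk))]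
    rw [PySem.Set.add_eq_ite]
  refine Eq.trans (PySem.List.foldl_congr_mem _ _ _ _ hcongr) ?_
  exact Eq.trans (PySem.Set.update_map_eq_foldl_add ..).symm (PySem.Set.update_nil_left _)

-- B's set comprehension builds the same set of rotations
theorem rotations_eq (l : List Char) :
    ((PySem.List.pyRange 0 (l.length : Int) 1).foldl
      (fun st i => PySem.Set.add st
        (PySem.List.slice l (some i) none ++ PySem.List.slice l none (some i)))
      PySem.Set.empty) =
    PySem.Set.ofList ((List.range l.length).map (pvRot l)) := by
  rw [PySem.List.pyRange_one]
  simp only [sub_zero, Int.toNat_natCast, List.foldl_map, zero_add]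
  have hcongr : ∀ (st : List (List Char)) (k : Nat), k ∈ List.range l.length →
      PySem.Set.add st
        (PySem.List.slice l (some (k : Int)) none ++ PySem.List.slice l none (some (k : Int))) =
      PySem.Set.add st (pvRot l k) := by
    intro st k _
    rw [PySem.List.slice_from_natCast, PySem.List.slice_to_natCast, pvRot]
  refine Eq.trans (PySem.List.foldl_congr_mem _ _ _ _ hcongr) ?_
  exact Eq.trans (PySem.Set.update_map_eq_foldl_add ..).symm (PySem.Set.update_nil_left _)

-- the port's sorted call, re-typed with the LinearOrder's decidability instance
theorem sorted_inst (S : List (List Char)) :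
    @PySem.List.sorted (List Char) (List Char) List.instLT (fun a b => a.decidableLT b) S (fun x => x) true
      = @PySem.List.sorted (List Char) (List Char) List.instLT (@LinearOrder.toDecidableLT (List Char) _) S (fun x => x) true := by
  have h : (fun (a b : List Char) => a.decidableLT b) = (@LinearOrder.toDecidableLT (List Char) _) := by
    funext a b; exact Subsingleton.elim _ _
  rw [h]

-- ===== VERDICT (by name: the statement is the Claim_ definition above) =====
theorem lexicographic_number_spec : Claim_equal_lexicographic_number := by
  intro s _hdom hpre
  unfold Spec_lexicographic_number lexicographic_number lexicographic_number_alt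
  set l := s.toList with hl
  have hlne : l ≠ [] := by
    intro h
    apply hpre
    cases s; simp_all
  have hn : 0 < l.length := List.length_pos_iff.mpr hlne
  simp only [states_eq, rotations_eq]
  set S := PySem.Set.ofList ((List.range l.length).map (pvRot l)) with hS
  have horig : PySem.List.slice (l ++ l) none (some (l.length : Int)) = l := by
    rw [PySem.List.slice_to_natCast, List.take_left]
  have hmem : l ∈ S := by
    rw [hS, PySem.Set.mem_ofList]
    refine List.mem_map.mpr ⟨0, List.mem_range.mpr hn, ?_⟩
    simp [pvRot]
  set T := PySem.List.sorted S (fun x => x) true with hT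
  have hperm : T.Perm S := PySem.List.sorted_perm ..
  have hnodupT : T.Nodup := (hperm.nodup_iff).mpr (PySem.Set.nodup_ofList _)
  have hge : T.Pairwise (fun a b => b ≤ a) := by
    rw [hT, sorted_inst]
    exact PySem.List.sorted_pairwise_rev ..
  have hdesc : T.Pairwise (fun a b => b < a) := by
    have hand := List.Pairwise.and hge hnodupT
    exact hand.imp (fun hx => lt_of_le_of_ne hx.1 (Ne.symm hx.2))
  have hmemT : l ∈ T := (PySem.List.mem_sorted ..).mpr hmem
  rw [horig, index?_strict_desc T l hdesc hmemT]
  have hcount : T.countP (fun y => decide (l < y)) = S.countP (fun y => decide (l < y)) :=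
    hperm.countP_eq _
  have hlen : T.length = S.length := hperm.length_eq
  rw [PySem.List.foldl_ite_add_one]
  simp [hcount, hlen]
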